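-- pv_equiv track=rewrite | github.com/lkjalop/tire-defect-detection-system | RUBICON_CONSOLIDATED.py | _identify_cost_savings
-- ===== SOURCE A (Python) =====
-- from typing import Dict, List, Optional, Any
--
-- def _identify_cost_savings(data: List[Dict[str, Any]]) -> List[str]:
--     """Identify cost optimization opportunities."""
--     recommendations = []
--     critical_count = sum(1 for tire in data if tire["overall_condition"] == "CRITICAL")
--
--     if critical_count > 0:
--         recommendations.append(f"Immediate replacement of {critical_count} critical tires prevents ${critical_count * 5000:,} in potential damages")
--
--     warning_count = sum(1 for tire in data if tire["overall_condition"] == "WARNING")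
--     if warning_count > 0:
--         recommendations.append(f"Proactive maintenance of {warning_count} warning tires saves ${warning_count * 1500:,} annually")
--
--     return recommendations
-- ===== SOURCE B (Python) =====
-- from typing import Dict, List, Optional, Any
--
-- def _identify_cost_savings(data: List[Dict[str, Any]]) -> List[str]:
--     """Identify cost optimization opportunities (one-pass tally + table-driven messages)."""
--     crit = warn = 0
--     for tire in data:
--         cond = tire["overall_condition"]
--         if cond == "CRITICAL":
--             crit += 1
--         elif cond == "WARNING":
--             warn += 1
--     rules = [
--         (crit, "Immediate replacement of", "critical tires prevents", 5000, "in potential damages"),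
--         (warn, "Proactive maintenance of", "warning tires saves", 1500, "annually"),
--     ]
--     return [
--         f"{verb} {n} {noun} ${n * unit:,} {tail}"
--         for n, verb, noun, unit, tail in rules
--         if n > 0
--     ]
-- ===== Notes on version B (the rewrite author's own statement) =====
-- stated objective: alternative
-- what changed: B replaces A's two separate counting scans and hand-written appends with one pass that tallies both counts in a pair of accumulators, then builds the output from a data-driven rules table (count, phrase parts, unit cost) via a filtered comprehension.
import Mathlib
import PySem

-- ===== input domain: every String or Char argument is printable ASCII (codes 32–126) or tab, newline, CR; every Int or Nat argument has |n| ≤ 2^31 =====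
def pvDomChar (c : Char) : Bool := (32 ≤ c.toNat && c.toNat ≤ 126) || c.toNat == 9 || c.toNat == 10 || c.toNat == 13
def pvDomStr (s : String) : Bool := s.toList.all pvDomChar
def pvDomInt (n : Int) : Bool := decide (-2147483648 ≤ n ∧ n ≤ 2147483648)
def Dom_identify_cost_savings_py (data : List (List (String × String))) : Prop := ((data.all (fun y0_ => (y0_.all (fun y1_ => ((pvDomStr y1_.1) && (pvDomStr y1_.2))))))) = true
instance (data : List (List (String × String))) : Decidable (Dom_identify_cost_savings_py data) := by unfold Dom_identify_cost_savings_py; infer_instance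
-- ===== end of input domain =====

-- B replaces A's two counting scans + explicit appends by one tallying pass over a pair of
-- accumulators followed by a table-driven message build (objective: alternative).
-- Pre_ excludes inputs on which Python A raises KeyError (a tire without "overall_condition").

-- shared helper: Python's format(n, ',') for a nonnegative int (the only values reached here)
def pvCommaRev : Nat → List Char → List Char
  | _, [] => []
  | 3, cs => ',' :: pvCommaRev 0 cs
  | k, c :: cs => c :: pvCommaRev (k + 1) cs

def pvCommaFmt (n : Int) : String :=
  String.ofList ((pvCommaRev 0 (PySem.Int.toChars n).reverse).reverse)

def pvCond (tire : List (String × String)) : String :=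
  (tire.lookup "overall_condition").getD ""

-- ===== PORT A =====
def identify_cost_savings_py (data : List (List (String × String))) : List String :=
  let recommendations : List String := []
  let critical_count : Int :=
    data.foldl (fun acc tire => if pvCond tire == "CRITICAL" then acc + 1 else acc) 0
  let recommendations :=
    if critical_count > 0 then
      recommendations ++ ["Immediate replacement of " ++ PySem.Int.toStr critical_count ++
        " critical tires prevents $" ++ pvCommaFmt (critical_count * 5000) ++ " in potential damages"]
    else recommendations
  let warning_count : Int :=
    data.foldl (fun acc tire => if pvCond tire == "WARNING" then acc + 1 else acc) 0
  let recommendations :=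
    if warning_count > 0 then
      recommendations ++ ["Proactive maintenance of " ++ PySem.Int.toStr warning_count ++
        " warning tires saves $" ++ pvCommaFmt (warning_count * 1500) ++ " annually"]
    else recommendations
  recommendations

-- ===== PORT B =====
-- the f-string f"{verb} {n} {noun} ${n * unit:,} {tail}" of Source B
def pvRuleMsg (n : Int) (verb noun : String) (unit : Int) (tail : String) : String :=
  verb ++ " " ++ PySem.Int.toStr n ++ " " ++ noun ++ " $" ++ pvCommaFmt (n * unit) ++ " " ++ tail

def identify_cost_savings_py_alt (data : List (List (String × String))) : List String :=
  let tally :=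
    data.foldl (fun (p : Int × Int) tire =>
      let cond := pvCond tire
      if cond == "CRITICAL" then (p.1 + 1, p.2)
      else if cond == "WARNING" then (p.1, p.2 + 1)
      else p) (0, 0)
  let rules : List (Int × String × String × Int × String) :=
    [(tally.1, "Immediate replacement of", "critical tires prevents", 5000, "in potential damages"),
     (tally.2, "Proactive maintenance of", "warning tires saves", 1500, "annually")]
  rules.flatMap (fun r =>
    if r.1 > 0 then [pvRuleMsg r.1 r.2.1 r.2.2.1 r.2.2.2.1 r.2.2.2.2] else [])

-- ===== PRECONDITION & SPEC =====
-- Pre_ excludes exactly the inputs where A raises KeyError: a tire dict without "overall_condition".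
def Pre_identify_cost_savings_py (data : List (List (String × String))) : Prop :=
  (data.all (fun tire => (tire.lookup "overall_condition").isSome)) = true
instance (data : List (List (String × String))) : Decidable (Pre_identify_cost_savings_py data) := by
  unfold Pre_identify_cost_savings_py; infer_instance

def pvWitness_identify_cost_savings_py : (List (List (String × String))) :=
  [[("overall_condition", "CRITICAL")], [("overall_condition", "OK")]]

def Spec_identify_cost_savings_py (data : List (List (String × String))) (out : List String) : Prop := out = identify_cost_savings_py_alt data
instance (data : List (List (String × String))) (out : List String) : Decidable (Spec_identify_cost_savings_py data out) := by unfold Spec_identify_cost_savings_py; infer_instance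

-- ===== CLAIM (what is proved, stated in full; the proofs are below) =====
def Claim_equal_identify_cost_savings_py : Prop := ∀ (data : List (List (String × String))), Dom_identify_cost_savings_py data → Pre_identify_cost_savings_py data → Spec_identify_cost_savings_py data (identify_cost_savings_py data)

-- ===== LEMMAS AND PROOFS =====

-- B's one-pass pair tally computes the same two counts as A's two separate scans
lemma tally_eq (data : List (List (String × String))) (a b : Int) :
    data.foldl (fun (p : Int × Int) tire =>
      let cond := pvCond tire
      if cond == "CRITICAL" then (p.1 + 1, p.2)
      else if cond == "WARNING" then (p.1, p.2 + 1)
      else p) (a, b)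
    = (data.foldl (fun acc tire => if pvCond tire == "CRITICAL" then acc + 1 else acc) a,
       data.foldl (fun acc tire => if pvCond tire == "WARNING" then acc + 1 else acc) b) := by
  induction data generalizing a b with
  | nil => rfl
  | cons t ts ih =>
      simp only [List.foldl_cons]
      by_cases h1 : pvCond t == "CRITICAL"
      · have h2 : (pvCond t == "WARNING") = false := by
          cases hb : (pvCond t == "WARNING")
          · rfl
          · have e1 := eq_of_beq h1
            have e2 := eq_of_beq hb
            rw [e1] at e2
            exact absurd e2 (by decide)
        simp only [h1, h2, if_true, Bool.false_eq_true, if_false]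
        exact ih _ _
      · rw [Bool.not_eq_true] at h1
        cases h2 : pvCond t == "WARNING"
        · simp only [h1, h2, Bool.false_eq_true, if_false]
          exact ih _ _
        · simp only [h1, h2, if_true, Bool.false_eq_true, if_false]
          exact ih _ _

-- the rule message equals A's inline string (regrouped appends, merged literals)
lemma ruleMsg_crit (n : Int) :
    pvRuleMsg n "Immediate replacement of" "critical tires prevents" 5000 "in potential damages"
    = "Immediate replacement of " ++ PySem.Int.toStr n ++
        " critical tires prevents $" ++ pvCommaFmt (n * 5000) ++ " in potential damages" := by
  simp [pvRuleMsg, String.append_assoc]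

lemma ruleMsg_warn (n : Int) :
    pvRuleMsg n "Proactive maintenance of" "warning tires saves" 1500 "annually"
    = "Proactive maintenance of " ++ PySem.Int.toStr n ++
        " warning tires saves $" ++ pvCommaFmt (n * 1500) ++ " annually" := by
  simp [pvRuleMsg, String.append_assoc]

-- ===== VERDICT (by name: the statement is the Claim_ definition above) =====
theorem identify_cost_savings_py_spec : Claim_equal_identify_cost_savings_py := by
  intro data _ _
  unfold Spec_identify_cost_savings_py identify_cost_savings_py identify_cost_savings_py_alt
  simp only [tally_eq, List.flatMap_cons, List.flatMap_nil, List.append_nil]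
  split_ifs <;> simp [ruleMsg_crit, ruleMsg_warn]
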